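-- pv_equiv track=rewrite | github.com/CozyKim/code_practices | BOJ/greedy/14711.py | flopping
-- ===== SOURCE A (Python) =====
-- from copy import deepcopy
--
-- def flopping(line, N, idxs):
--     line_copy = deepcopy(line)
--     Index = []
--     dir = [-1, 0, 1]
--     for idx, tile in enumerate(line_copy):
--         if tile == '#':
--             Index.append(idx)
--     if idxs != None:
--         for idx in idxs:
--             line_copy[idx] = ('#' if line_copy[idx] == '.' else '.')
--     for idx in Index:
--         for col in dir:
--             if 0 <= idx + col < N:
--                 if line_copy[idx + col] == '.':
--                     line_copy[idx + col] = '#'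
--                 elif line_copy[idx + col] == '#':
--                     line_copy[idx + col] = '.'
--
--     return line_copy, Index
-- ===== SOURCE B (Python) =====
-- from copy import deepcopy
--
-- def flopping(line, N, idxs):
--     line_copy = deepcopy(line)
--     Index = [i for i, tile in enumerate(line_copy) if tile == '#']
--     if idxs != None:
--         for idx in idxs:
--             line_copy[idx] = ('#' if line_copy[idx] == '.' else '.')
--     cov = {}
--     for i in Index:
--         for p in (i - 1, i, i + 1):
--             if 0 <= p < N:
--                 cov[p] = cov.get(p, 0) + 1
--     out = [('#' if cell == '.' else '.') if cov.get(j, 0) % 2 == 1 and cell in ('.', '#') else cell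
--            for j, cell in enumerate(line_copy)]
--     return out, Index
-- ===== Notes on version B (the rewrite author's own statement) =====
-- stated objective: alternative
-- what changed: B replaces A's sequential in-place neighbor-toggle mutation loop with a one-shot coverage counter (dict of how many times each position is hit by a '#' neighborhood) followed by a single functional pass that toggles exactly the cells with odd coverage.
import Mathlib
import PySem

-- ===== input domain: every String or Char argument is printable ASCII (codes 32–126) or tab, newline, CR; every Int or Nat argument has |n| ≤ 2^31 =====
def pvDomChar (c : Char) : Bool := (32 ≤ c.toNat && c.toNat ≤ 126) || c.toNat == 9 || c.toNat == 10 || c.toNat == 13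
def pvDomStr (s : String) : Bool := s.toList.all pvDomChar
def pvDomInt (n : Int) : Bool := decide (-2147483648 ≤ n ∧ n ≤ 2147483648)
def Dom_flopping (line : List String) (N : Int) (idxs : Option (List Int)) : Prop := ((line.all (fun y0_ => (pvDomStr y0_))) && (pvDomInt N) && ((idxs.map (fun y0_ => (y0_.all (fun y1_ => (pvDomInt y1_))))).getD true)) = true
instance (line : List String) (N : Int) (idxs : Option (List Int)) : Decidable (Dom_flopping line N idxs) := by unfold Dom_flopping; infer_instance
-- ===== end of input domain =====

-- B replaces A's sequential neighbor-toggle mutations by a coverage-count dict plus a single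
-- parity pass (alternative decomposition, same cost); return values agree on Pre_.

-- ===== PORT A =====
def flopping (line : List String) (N : Int) (idxs : Option (List Int)) : List String × List Int :=
  let line_copy := line
  let Index : List Int :=
    (PySem.List.enumerate line_copy).foldl
      (fun acc it => if it.2 == "#" then acc ++ [it.1] else acc) []
  let line_copy :=
    match idxs with
    | none => line_copy
    | some l => l.foldl (fun lc idx =>
        PySem.List.pySetD lc idx
          (if PySem.List.pyGetD lc idx "" == "." then "#" else ".")) line_copy
  let line_copy :=
    Index.foldl (fun lc idx =>
      [(-1 : Int), 0, 1].foldl (fun lc col =>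
        if 0 ≤ idx + col ∧ idx + col < N then
          if PySem.List.pyGetD lc (idx + col) "" == "." then
            PySem.List.pySetD lc (idx + col) "#"
          else if PySem.List.pyGetD lc (idx + col) "" == "#" then
            PySem.List.pySetD lc (idx + col) "."
          else lc
        else lc) lc) line_copy
  (line_copy, Index)

-- ===== PORT B =====
def flopping_alt (line : List String) (N : Int) (idxs : Option (List Int)) : List String × List Int :=
  let line_copy := line
  let Index : List Int :=
    ((PySem.List.enumerate line_copy).filter (fun it => it.2 == "#")).map (·.1)
  let line_copy :=
    match idxs with
    | none => line_copy
    | some l => l.foldl (fun lc idx =>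
        PySem.List.pySetD lc idx
          (if PySem.List.pyGetD lc idx "" == "." then "#" else ".")) line_copy
  let cov : PySem.Dict Int Int :=
    Index.foldl (fun d i =>
      [i - 1, i, i + 1].foldl (fun d p =>
        if 0 ≤ p ∧ p < N then d.insert p (d.getD p 0 + 1) else d) d) PySem.Dict.empty
  let out :=
    (PySem.List.enumerate line_copy).map (fun it =>
      if PySem.Int.mod (cov.getD it.1 0) 2 == 1 && (it.2 == "." || it.2 == "#") then
        (if it.2 == "." then "#" else ".")
      else it.2)
  (out, Index)

-- ===== PRECONDITION & SPEC =====
-- Pre_ excludes exactly the inputs on which A raises IndexError: an idxs entry out of range,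
-- or the original last tile is "#" while N > len(line) (A then indexes line_copy[len(line)]).
def Pre_flopping (line : List String) (N : Int) (idxs : Option (List Int)) : Prop :=
  (∀ l, idxs = some l → ∀ j ∈ l, PySem.Raise.InRange line.length j) ∧
  (line.getLast? = some "#" → N ≤ (line.length : Int))
instance (line : List String) (N : Int) (idxs : Option (List Int)) : Decidable (Pre_flopping line N idxs) := by unfold Pre_flopping; infer_instance

def pvWitness_flopping : List String × Int × Option (List Int) := (["#", "."], 2, some [0])

def Spec_flopping (line : List String) (N : Int) (idxs : Option (List Int)) (out : List String × List Int) : Prop := out = flopping_alt line N idxs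
instance (line : List String) (N : Int) (idxs : Option (List Int)) (out : List String × List Int) : Decidable (Spec_flopping line N idxs out) := by unfold Spec_flopping; infer_instance

-- ===== CLAIM (what is proved, stated in full; the proofs are below) =====
def Claim_equal_flopping : Prop := ∀ (line : List String) (N : Int) (idxs : Option (List Int)), Dom_flopping line N idxs → Pre_flopping line N idxs → Spec_flopping line N idxs (flopping line N idxs)
-- ===== LEMMAS AND PROOFS =====

-- the cell toggle '.' <-> '#' (other cells unchanged)
def tgl (s : String) : String := if s == "." then "#" else if s == "#" then "." else s

-- one in-range toggle of A's final loop, at position p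
def stepT (lc : List String) (p : Int) : List String :=
  if PySem.List.pyGetD lc p "" == "." then PySem.List.pySetD lc p "#"
  else if PySem.List.pyGetD lc p "" == "#" then PySem.List.pySetD lc p "."
  else lc

lemma tgl_tgl (s : String) : tgl (tgl s) = s := by
  unfold tgl
  by_cases h1 : s == "."
  · simp_all
  · by_cases h2 : s == "#" <;> simp_all

lemma length_stepT (lc : List String) (p : Int) : (stepT lc p).length = lc.length := by
  unfold stepT; split_ifs <;> simp [PySem.List.length_pySetD]

lemma getElem?_stepT (lc : List String) (p : Int) (hp : 0 ≤ p) (hp2 : p < (lc.length : Int))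
    (j : Nat) (hj : j < lc.length) :
    (stepT lc p)[j]? = some (if (j : Int) = p then tgl (lc[j]'hj) else lc[j]'hj) := by
  have hptn : p.toNat < lc.length := by omega
  have hgd : PySem.List.pyGetD lc p "" = lc[p.toNat]'hptn := by
    rw [PySem.List.pyGetD_of_nonneg lc "" hp]
    exact List.getD_eq_getElem lc "" hptn
  unfold stepT tgl
  rw [PySem.List.pySetD_of_nonneg lc "#" hp, PySem.List.pySetD_of_nonneg lc "." hp, hgd]
  by_cases hjp : (j : Int) = p
  · have hjt : p.toNat = j := by omega
    subst hjt
    split_ifs <;>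
      simp_all [List.getElem?_set_self, List.getElem?_eq_getElem hj]
  · have hjt : p.toNat ≠ j := by omega
    split_ifs <;>
      simp_all [List.getElem?_set_ne hjt, List.getElem?_eq_getElem hj]

-- the core parity lemma: folding in-range toggles = toggling cells hit an odd number of times
lemma foldl_stepT_length (P : List Int) (lc : List String) :
    (P.foldl stepT lc).length = lc.length := by
  induction P generalizing lc with
  | nil => rfl
  | cons p P ih => simp [List.foldl_cons, ih, length_stepT]

lemma foldl_stepT_getElem? (P : List Int) (lc : List String)
    (hP : ∀ p ∈ P, 0 ≤ p ∧ p < (lc.length : Int)) (j : Nat) (hj : j < lc.length) :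
    (P.foldl stepT lc)[j]? =
      some (if P.count (j : Int) % 2 = 1 then tgl (lc[j]'hj) else lc[j]'hj) := by
  induction P generalizing lc with
  | nil => simp [List.getElem?_eq_getElem hj]
  | cons p P ih =>
    have hp := hP p (by simp)
    have hlen : (stepT lc p).length = lc.length := length_stepT lc p
    have hP' : ∀ q ∈ P, 0 ≤ q ∧ q < ((stepT lc p).length : Int) := by
      intro q hq; rw [hlen]; exact hP q (by simp [hq])
    have hj' : j < (stepT lc p).length := by rw [hlen]; exact hj
    rw [List.foldl_cons, ih (stepT lc p) hP' hj']
    have hq := getElem?_stepT lc p hp.1 hp.2 j hj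
    rw [List.getElem?_eq_getElem hj'] at hq
    have hst := Option.some.inj hq
    rw [hst, List.count_cons]
    by_cases hjp : (j : Int) = p
    · subst hjp
      rcases Nat.even_or_odd (P.count (j : Int)) with h | h
      · have h0 : P.count (j : Int) % 2 = 0 := Nat.even_iff.mp h
        have h1 : (P.count (j : Int) + 1) % 2 = 1 := by omega
        simp [h0, h1]
      · have h0 : P.count (j : Int) % 2 = 1 := Nat.odd_iff.mp h
        have h1 : (P.count (j : Int) + 1) % 2 = 0 := by omega
        simp [h0, h1, tgl_tgl]
    · have hbe : (p == (j : Int)) = false := by simp [Ne.symm hjp]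
      simp [hbe, hjp]

lemma foldl_if_stepT (N : Int) (L : List Int) (lc : List String) :
    L.foldl (fun lc x => if 0 ≤ x ∧ x < N then stepT lc x else lc) lc
      = (L.filter (fun x => decide (0 ≤ x ∧ x < N))).foldl stepT lc := by
  induction L generalizing lc with
  | nil => rfl
  | cons x L ih =>
    by_cases h : 0 ≤ x ∧ x < N <;>
      simp [List.foldl_cons, List.filter_cons, h, ih]

-- A's nested final loop is the foldl of stepT over the flat list of in-range covered positions
lemma a_loop_eq_foldl_stepT (Index : List Int) (N : Int) (lc : List String) :
    Index.foldl (fun lc idx =>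
        [(-1 : Int), 0, 1].foldl (fun lc col =>
          if 0 ≤ idx + col ∧ idx + col < N then
            if PySem.List.pyGetD lc (idx + col) "" == "." then
              PySem.List.pySetD lc (idx + col) "#"
            else if PySem.List.pyGetD lc (idx + col) "" == "#" then
              PySem.List.pySetD lc (idx + col) "."
            else lc
          else lc) lc) lc
      = (Index.flatMap (fun i =>
          [i - 1, i, i + 1].filter (fun p => decide (0 ≤ p ∧ p < N)))).foldl stepT lc := by
  induction Index generalizing lc with
  | nil => rfl
  | cons i Index ih =>
    rw [List.foldl_cons, ih, List.flatMap_cons, List.foldl_append]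
    congr 1
    show _ = ([i - 1, i, i + 1].filter (fun p => decide (0 ≤ p ∧ p < N))).foldl stepT lc
    have body : ∀ (lc : List String) (col : Int),
        (if 0 ≤ i + col ∧ i + col < N then
          if PySem.List.pyGetD lc (i + col) "" == "." then
            PySem.List.pySetD lc (i + col) "#"
          else if PySem.List.pyGetD lc (i + col) "" == "#" then
            PySem.List.pySetD lc (i + col) "."
          else lc
        else lc) = (if 0 ≤ i + col ∧ i + col < N then stepT lc (i + col) else lc) := by
      intro lc col
      unfold stepT
      rfl
    simp only [List.foldl_cons, List.foldl_nil, body]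
    have e1 : i + (-1) = i - 1 := by omega
    have e2 : i + (0 : Int) = i := by omega
    rw [e1, e2]
    have gen := foldl_if_stepT N [i - 1, i, i + 1] lc
    simp only [List.foldl_cons, List.foldl_nil] at gen
    rw [gen]

-- B's counter dict counts exactly the occurrences in that same flat list
lemma inner_count (N v : Int) (Q : List Int) (d : PySem.Dict Int Int) :
    (Q.foldl (fun d p =>
        if 0 ≤ p ∧ p < N then d.insert p (d.getD p 0 + 1) else d) d).getD v 0
      = d.getD v 0 + ((Q.filter (fun p => decide (0 ≤ p ∧ p < N))).count v : Int) := by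
  induction Q generalizing d with
  | nil => simp
  | cons p Q ih =>
    rw [List.foldl_cons]
    by_cases h : 0 ≤ p ∧ p < N
    · rw [if_pos h, ih]
      have hf : List.filter (fun q => decide (0 ≤ q ∧ q < N)) (p :: Q)
          = p :: List.filter (fun q => decide (0 ≤ q ∧ q < N)) Q := by
        simp [List.filter_cons, h]
      rw [hf, List.count_cons]
      by_cases hv : p = v
      · subst hv
        simp [PySem.Dict.getD_insert]
        push_cast
        ring
      · have hbe : (p == v) = false := by simp [hv]
        simp [PySem.Dict.getD_insert, Ne.symm hv, hbe]
    · rw [if_neg h, ih]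
      congr 2
      simp [List.filter_cons, h]

lemma cov_getD_eq_count (Index : List Int) (N : Int) (v : Int) :
    (Index.foldl (fun d i =>
        [i - 1, i, i + 1].foldl (fun d p =>
          if 0 ≤ p ∧ p < N then d.insert p (d.getD p 0 + 1) else d) d) PySem.Dict.empty).getD v 0
      = ((Index.flatMap (fun i =>
          [i - 1, i, i + 1].filter (fun p => decide (0 ≤ p ∧ p < N)))).count v : Int) := by
  have key : ∀ (L : List Int) (d : PySem.Dict Int Int),
      (L.foldl (fun d i =>
        [i - 1, i, i + 1].foldl (fun d p =>
          if 0 ≤ p ∧ p < N then d.insert p (d.getD p 0 + 1) else d) d) d).getD v 0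
      = d.getD v 0 + ((L.flatMap (fun i =>
          [i - 1, i, i + 1].filter (fun p => decide (0 ≤ p ∧ p < N)))).count v : Int) := by
    intro L
    induction L with
    | nil => simp
    | cons i L ih =>
      intro d
      rw [List.foldl_cons, ih, List.flatMap_cons, List.count_append, inner_count]
      push_cast
      ring
  rw [key]
  simp

-- the toggle-by-idxs phase (identical in both ports) preserves length
lemma length_toggle_fold (l : List Int) (lc : List String) :
    (l.foldl (fun lc idx =>
        PySem.List.pySetD lc idx
          (if PySem.List.pyGetD lc idx "" == "." then "#" else ".")) lc).length
      = lc.length := by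
  induction l generalizing lc with
  | nil => rfl
  | cons j l ih =>
    rw [List.foldl_cons, ih, PySem.List.length_pySetD]

-- membership in the flat covered-position list, when Index comes from the original line
lemma flat_pos_bounds (xs : List String) (N : Int)
    (hN : xs.getLast? = some "#" → N ≤ (xs.length : Int))
    (p : Int)
    (hp : p ∈ (((PySem.List.enumerate xs).filter (fun it => it.2 == "#")).map (·.1)).flatMap
        (fun i => [i - 1, i, i + 1].filter (fun q => decide (0 ≤ q ∧ q < N)))) :
    0 ≤ p ∧ p < (xs.length : Int) := by
  rw [List.mem_flatMap] at hp
  obtain ⟨i, hi, hpF⟩ := hp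
  rw [List.mem_filter] at hpF
  obtain ⟨hpm, hrange⟩ := hpF
  have hrange' : 0 ≤ p ∧ p < N := by simpa using hrange
  rw [List.mem_map] at hi
  obtain ⟨it, hit, hfst⟩ := hi
  rw [List.mem_filter] at hit
  obtain ⟨hmem, hsharp⟩ := hit
  rw [PySem.List.mem_enumerate_iff] at hmem
  obtain ⟨k, hk, hitval⟩ := hmem
  have hival : i = (k : Int) := by rw [hitval] at hfst; simpa using hfst.symm
  have hsharp' : xs[k]? = some "#" := by
    rw [List.getElem?_eq_getElem hk]
    rw [hitval] at hsharp
    simpa using hsharp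
  refine ⟨hrange'.1, ?_⟩
  by_contra hge
  push_neg at hge
  -- p ∈ {i-1, i, i+1}, i = k < len, so p ≥ len forces p = len and k = len - 1
  simp only [List.mem_cons, List.not_mem_nil, or_false] at hpm
  have hklen : k = xs.length - 1 := by omega
  have hlast : xs.getLast? = some "#" := by
    rw [List.getLast?_eq_getElem?]
    subst hklen
    exact hsharp'
  have := hN hlast
  omega

-- ===== VERDICT (by name: the statement is the Claim_ definition above) =====
theorem flopping_spec : Claim_equal_flopping := by
  intro line N idxs _hdom hpre
  unfold Spec_flopping flopping flopping_alt
  obtain ⟨hidxs, hlastN⟩ := hpre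
  -- the Index lists agree
  have hIndex :
      (PySem.List.enumerate line).foldl
        (fun acc it => if it.2 == "#" then acc ++ [it.1] else acc) []
      = ((PySem.List.enumerate line).filter (fun it => it.2 == "#")).map (·.1) := by
    rw [PySem.List.foldl_append_if]
    simp
  simp only [hIndex]
  set Index := ((PySem.List.enumerate line).filter (fun it => it.2 == "#")).map (·.1) with hIdef
  -- the toggled lines agree (identical code)
  set T := (match idxs with
    | none => line
    | some l => l.foldl (fun lc idx =>
        PySem.List.pySetD lc idx
          (if PySem.List.pyGetD lc idx "" == "." then "#" else ".")) line) with hTdef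
  have hTlen : T.length = line.length := by
    rw [hTdef]; cases idxs with
    | none => rfl
    | some l => exact length_toggle_fold l line
  -- reduce A's nested loop to foldl stepT over the flat covered-position list P
  set P := Index.flatMap (fun i =>
      [i - 1, i, i + 1].filter (fun q => decide (0 ≤ q ∧ q < N))) with hPdef
  have hP : ∀ p ∈ P, 0 ≤ p ∧ p < (T.length : Int) := by
    intro p hp
    rw [hTlen]
    exact flat_pos_bounds line N hlastN p (hPdef ▸ hp)
  refine Prod.ext ?_ rfl
  show Index.foldl _ T = _
  rw [a_loop_eq_foldl_stepT Index N T, ← hPdef]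
  -- compare pointwise
  apply List.ext_getElem
  · rw [foldl_stepT_length]
    simp [PySem.List.length_enumerate, hTlen]
  · intro j hj1 hj2
    have hjT : j < T.length := by rwa [foldl_stepT_length] at hj1
    have hq := foldl_stepT_getElem? P T hP j hjT
    rw [List.getElem?_eq_getElem hj1] at hq
    rw [Option.some.inj hq]
    have henum : (PySem.List.enumerate T)[j]'(by simpa [PySem.List.length_enumerate] using hjT)
        = ((0 : Int) + (j : Int), T[j]'hjT) := by
      exact PySem.List.getElem_enumerate ..
    rw [List.getElem_map, henum]
    rw [cov_getD_eq_count Index N, ← hPdef]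
    simp only [zero_add]
    set s := T[j]'hjT with hsdef
    set c := P.count (j : Int) with hcdef
    have hmod : PySem.Int.mod (c : Int) 2 = ((c % 2 : Nat) : Int) :=
      PySem.Int.mod_natCast c 2
    rw [hmod]
    by_cases hodd : c % 2 = 1
    · rw [if_pos hodd]
      by_cases h1 : s == "."
      · have : s = "." := by simpa using h1
        simp [this, hodd, tgl]
      · by_cases h2 : s == "#"
        · have : s = "#" := by simpa using h2
          simp [this, hodd, tgl]
        · simp [h1, h2, tgl, hodd]
    · rw [if_neg hodd]
      have hfalse : (((c % 2 : Nat) : Int) == 1) = false := by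
        simp
        omega
      simp only [hfalse, Bool.false_and]
      simp
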